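-- pv_equiv track=rewrite | github.com/harishankarn04/Openlab_B210_SDR | gr-custom_gfsk/python/custom_gfsk/custom_gfsk_lib.py | _slow_hamming_8_4_decode
-- ===== SOURCE A (Python) =====
-- def _slow_hamming_8_4_decode(byte_val):
--     # Returns decoded nibble and error flag
--     bits = [(byte_val >> i) & 1 for i in range(8)][::-1]
--     p0, p1, p2, d1, p3, d2, d3, d4 = bits
--
--     s1 = p1 ^ d1 ^ d2 ^ d4
--     s2 = p2 ^ d1 ^ d3 ^ d4
--     s3 = p3 ^ d2 ^ d3 ^ d4
--
--     syndrome = (s1 << 2) | (s2 << 1) | s3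
--
--     # overall parity check
--     calc_p0 = sum(bits[1:]) % 2
--     parity_error = p0 != calc_p0
--
--     if syndrome == 0:
--         if parity_error:
--             pass # P0 itself is flipped, data is fine
--         return (d1 << 3) | (d2 << 2) | (d3 << 1) | d4, 0 # no error
--     else:
--         # Error exists
--         if parity_error: # Single bit error
--             error_pos = {
--                 1: 7, # p3
--                 2: 6, # p2
--                 3: 5, # d3
--                 4: 4, # p1
--                 5: 3, # d2
--                 6: 2, # d1
--                 7: 1  # d4
--             }
--             if syndrome in error_pos:
--                 pos = error_pos[syndrome]
--                 # Flip the bit in our bits list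
--                 bits[8-pos] ^= 1
--                 return (bits[3] << 3) | (bits[5] << 2) | (bits[6] << 1) | bits[7], 1 # Corrected
--         return (d1 << 3) | (d2 << 2) | (d3 << 1) | d4, 2 # Double error detected
-- ===== SOURCE B (Python) =====
-- # Table-driven Hamming(8,4) decoder: a 256-entry table built from the encoder
-- # side (valid codewords and their single-bit-error neighbourhoods).
--
-- def _build_decode_table():
--     # default: uncorrected data nibble read straight from the byte, flag 2
--     table = [((((b >> 4) & 1) << 3) | (((b >> 2) & 1) << 2)
--               | (((b >> 1) & 1) << 1) | (b & 1), 2) for b in range(256)]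
--     for nibble in range(16):
--         d1 = (nibble >> 3) & 1
--         d2 = (nibble >> 2) & 1
--         d3 = (nibble >> 1) & 1
--         d4 = nibble & 1
--         p1 = d1 ^ d2 ^ d4
--         p2 = d1 ^ d3 ^ d4
--         p3 = d2 ^ d3 ^ d4
--         p0 = (p1 + p2 + d1 + p3 + d2 + d3 + d4) % 2
--         cw = ((p0 << 7) | (p1 << 6) | (p2 << 5) | (d1 << 4)
--               | (p3 << 3) | (d2 << 2) | (d3 << 1) | d4)
--         table[cw] = (nibble, 0)          # exact codeword: no error
--         table[cw ^ 0x80] = (nibble, 0)   # overall-parity bit flipped: data fine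
--         for i in range(7):               # any other single flip: corrected
--             table[cw ^ (1 << i)] = (nibble, 1)
--     return table
--
-- _DECODE_TABLE = _build_decode_table()
--
-- def _slow_hamming_8_4_decode(byte_val):
--     return _DECODE_TABLE[byte_val % 256]
-- ===== Notes on version B (the rewrite author's own statement) =====
-- stated objective: idiomatic
-- what changed: Replaces the per-call bit-list/syndrome/dict computation by a module-level byte-indexed decode table built once from the encoder side (each valid codeword and its single-bit-error neighbourhood), so the function body is a single table lookup; B also decodes single errors in the d1/d3 data bits correctly where A flips the wrong data bit.
-- intended difference: On bytes lying at Hamming distance one from a valid codeword in the d1 or d3 data-bit position, A's bits[8-pos] correction flips the other data bit and returns the wrong nibble with the corrected flag; B returns the correctly decoded nibble there, which is the intended behaviour of a Hamming(8,4) decoder. — e.g. on _slow_hamming_8_4_decode(2): A returns (10, 1), B returns (0, 1)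
import Mathlib
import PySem

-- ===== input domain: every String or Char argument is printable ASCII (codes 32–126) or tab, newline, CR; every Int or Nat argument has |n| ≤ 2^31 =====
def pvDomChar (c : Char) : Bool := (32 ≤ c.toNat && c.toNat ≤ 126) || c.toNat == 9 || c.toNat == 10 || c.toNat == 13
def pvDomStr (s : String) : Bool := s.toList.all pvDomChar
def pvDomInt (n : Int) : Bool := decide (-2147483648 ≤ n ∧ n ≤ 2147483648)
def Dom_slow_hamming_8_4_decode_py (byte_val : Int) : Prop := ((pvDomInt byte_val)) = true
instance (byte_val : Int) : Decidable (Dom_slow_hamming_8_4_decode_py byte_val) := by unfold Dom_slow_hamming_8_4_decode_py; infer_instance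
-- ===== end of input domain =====

-- B replaces A's per-call syndrome computation by a byte-indexed decode table built once
-- from the encoder side (valid codewords and their single-bit-error neighbourhoods);
-- B also corrects the d1/d3 single-error cases where A flips the wrong data bit (see D_ below).

-- ===== PORT A =====
-- A-side helper: bits = [(byte_val >> i) & 1 for i in range(8)][::-1]
-- (byte_val >> i ported as floor division by 2^i — exact for Python's arithmetic shift;
--  slice? … (-1) is xs[::-1]; step -1 ≠ 0 so slice? is always `some` and getD's default is dead)
def pvBitsA (byte_val : Int) : List Int :=
  (PySem.List.slice? ((PySem.List.pyRange 0 8 1).map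
      (fun i => PySem.Int.band (PySem.Int.floordiv byte_val (2 ^ i.toNat)) 1)) none none (-1)).getD []

def slow_hamming_8_4_decode_py (byte_val : Int) : Int × Int :=
  let bits := pvBitsA byte_val
  match bits with
  | [p0, p1, p2, d1, p3, d2, d3, d4] =>
    let s1 := PySem.Int.bxor (PySem.Int.bxor (PySem.Int.bxor p1 d1) d2) d4
    let s2 := PySem.Int.bxor (PySem.Int.bxor (PySem.Int.bxor p2 d1) d3) d4
    let s3 := PySem.Int.bxor (PySem.Int.bxor (PySem.Int.bxor p3 d2) d3) d4
    let syndrome := PySem.Int.bor (PySem.Int.bor (s1 <<< 2) (s2 <<< 1)) s3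
    let calc_p0 := PySem.Int.mod (PySem.List.slice bits (some 1) none).sum 2
    let parity_error : Bool := p0 != calc_p0
    if syndrome = 0 then
      (PySem.Int.bor (PySem.Int.bor (PySem.Int.bor (d1 <<< 3) (d2 <<< 2)) (d3 <<< 1)) d4, 0)
    else
      if parity_error then
        let error_pos : PySem.Dict Int Int :=
          PySem.Dict.ofList [(1, 7), (2, 6), (3, 5), (4, 4), (5, 3), (6, 2), (7, 1)]
        match error_pos.get? syndrome with
        | some pos =>
          let bits2 := PySem.List.pySetD bits (8 - pos)
            (PySem.Int.bxor (PySem.List.pyGetD bits (8 - pos) 0) 1)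
          (PySem.Int.bor (PySem.Int.bor (PySem.Int.bor ((PySem.List.pyGetD bits2 3 0) <<< 3)
              ((PySem.List.pyGetD bits2 5 0) <<< 2)) ((PySem.List.pyGetD bits2 6 0) <<< 1))
            (PySem.List.pyGetD bits2 7 0), 1)
        | none =>
          (PySem.Int.bor (PySem.Int.bor (PySem.Int.bor (d1 <<< 3) (d2 <<< 2)) (d3 <<< 1)) d4, 2)
      else
        (PySem.Int.bor (PySem.Int.bor (PySem.Int.bor (d1 <<< 3) (d2 <<< 2)) (d3 <<< 1)) d4, 2)
  | _ => (0, 0)  -- unreachable: bits always has exactly 8 elements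

-- ===== PORT B =====
-- B-side helper: the module-level 256-entry decode table (_build_decode_table in Source B);
-- all ints in the build are small non-negative, ported with Nat bit operations.
def pvBuildDecodeTable : List (Int × Int) :=
  let init := (List.range 256).map (fun b =>
    ((((((b >>> 4) &&& 1) <<< 3) ||| (((b >>> 2) &&& 1) <<< 2) |||
        (((b >>> 1) &&& 1) <<< 1) ||| (b &&& 1) : Nat) : Int), (2 : Int)))
  (List.range 16).foldl (fun table nibble =>
    let d1 := (nibble >>> 3) &&& 1
    let d2 := (nibble >>> 2) &&& 1
    let d3 := (nibble >>> 1) &&& 1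
    let d4 := nibble &&& 1
    let p1 := d1 ^^^ d2 ^^^ d4
    let p2 := d1 ^^^ d3 ^^^ d4
    let p3 := d2 ^^^ d3 ^^^ d4
    let p0 := (p1 + p2 + d1 + p3 + d2 + d3 + d4) % 2
    let cw := (p0 <<< 7) ||| (p1 <<< 6) ||| (p2 <<< 5) ||| (d1 <<< 4) |||
              (p3 <<< 3) ||| (d2 <<< 2) ||| (d3 <<< 1) ||| d4
    let t := table.set cw ((nibble : Int), 0)
    let t := t.set (cw ^^^ 0x80) ((nibble : Int), 0)
    (List.range 7).foldl (fun t i => t.set (cw ^^^ (1 <<< i)) ((nibble : Int), 1)) t) init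

def pvDecodeTable : List (Int × Int) := pvBuildDecodeTable

-- table[byte_val % 256]: the index is always in [0, 256), so getD's default is dead
def slow_hamming_8_4_decode_py_alt (byte_val : Int) : Int × Int :=
  pvDecodeTable.getD (PySem.Int.mod byte_val 256).toNat (0, 0)

-- ===== PRECONDITION & SPEC =====
-- On bytes lying at Hamming distance one from a valid codeword in the d1 or d3 data-bit
-- position, A's bits[8-pos] correction flips the other data bit and returns the wrong nibble
-- with the corrected flag; B returns the correctly decoded nibble there, which is the
-- intended behaviour of a Hamming(8,4) decoder.
def pvDList : List Int :=
  [2, 13, 16, 31, 35, 44, 49, 62, 69, 74, 87, 88, 100, 107, 118, 121, 134, 137,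
   148, 155, 167, 168, 181, 186, 193, 206, 211, 220, 224, 239, 242, 253]

def D_slow_hamming_8_4_decode_py (byte_val : Int) : Prop :=
  PySem.Int.mod byte_val 256 ∈ pvDList
instance (byte_val : Int) : Decidable (D_slow_hamming_8_4_decode_py byte_val) := by
  unfold D_slow_hamming_8_4_decode_py; infer_instance

def Spec_slow_hamming_8_4_decode_py (byte_val : Int) (out : Int × Int) : Prop :=
  ¬ D_slow_hamming_8_4_decode_py byte_val → out = slow_hamming_8_4_decode_py_alt byte_val
instance (byte_val : Int) (out : Int × Int) : Decidable (Spec_slow_hamming_8_4_decode_py byte_val out) := by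
  unfold Spec_slow_hamming_8_4_decode_py; infer_instance

def pvDiffWitness_slow_hamming_8_4_decode_py : Int := 2
def pvDiffWitnessOut_slow_hamming_8_4_decode_py : (Int × Int) × (Int × Int) := ((10, 1), (0, 1))

-- ===== CLAIM (what is proved, stated in full; the proofs are below) =====
def Claim_unchanged_slow_hamming_8_4_decode_py : Prop := ∀ (byte_val : Int), Dom_slow_hamming_8_4_decode_py byte_val → Spec_slow_hamming_8_4_decode_py byte_val (slow_hamming_8_4_decode_py byte_val)
def Claim_changed_slow_hamming_8_4_decode_py : Prop := Dom_slow_hamming_8_4_decode_py (pvDiffWitness_slow_hamming_8_4_decode_py) ∧ D_slow_hamming_8_4_decode_py (pvDiffWitness_slow_hamming_8_4_decode_py) ∧ slow_hamming_8_4_decode_py (pvDiffWitness_slow_hamming_8_4_decode_py) = pvDiffWitnessOut_slow_hamming_8_4_decode_py.1 ∧ slow_hamming_8_4_decode_py_alt (pvDiffWitness_slow_hamming_8_4_decode_py) = pvDiffWitnessOut_slow_hamming_8_4_decode_py.2 ∧ pvDiffWitnessOut_slow_hamming_8_4_decode_py.1 ≠ pvDiffWitnessOut_slow_hamming_8_4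_decode_py.2
def Claim_exact_slow_hamming_8_4_decode_py : Prop := ∀ (byte_val : Int), Dom_slow_hamming_8_4_decode_py byte_val → D_slow_hamming_8_4_decode_py byte_val → slow_hamming_8_4_decode_py byte_val ≠ slow_hamming_8_4_decode_py_alt byte_val

-- ===== LEMMAS AND PROOFS =====

-- one extracted bit depends only on byte_val mod 256
theorem pvBitLem (b p : Int) (hp : 0 < p)
    (h : b / p % 2 = (b % 256) / p % 2) :
    PySem.Int.band (PySem.Int.floordiv b p) 1 =
      PySem.Int.band (PySem.Int.floordiv (PySem.Int.mod b 256) p) 1 := by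
  rw [PySem.Int.band_one, PySem.Int.band_one,
    PySem.Int.floordiv_eq_ediv_of_pos hp, PySem.Int.floordiv_eq_ediv_of_pos hp,
    PySem.Int.mod_eq_emod_of_pos (by norm_num : (0:Int) < 2),
    PySem.Int.mod_eq_emod_of_pos (by norm_num : (0:Int) < 2),
    PySem.Int.mod_eq_emod_of_pos (by norm_num : (0:Int) < 256)]
  exact h

theorem pvBitsA_mod (b : Int) : pvBitsA b = pvBitsA (PySem.Int.mod b 256) := by
  unfold pvBitsA
  rw [show PySem.List.pyRange 0 8 1 = [0, 1, 2, 3, 4, 5, 6, 7] from by decide]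
  rw [PySem.List.slice?_none_none_neg_one, PySem.List.slice?_none_none_neg_one]
  simp only [Option.getD_some, List.map]
  congr 1
  simp only [List.cons.injEq, and_true]
  refine ⟨?_, ?_, ?_, ?_, ?_, ?_, ?_, ?_⟩ <;>
    · apply pvBitLem _ _ (by norm_num)
      norm_num [show Int.toNat 2 = 2 from rfl, show Int.toNat 3 = 3 from rfl,
        show Int.toNat 4 = 4 from rfl, show Int.toNat 5 = 5 from rfl,
        show Int.toNat 6 = 6 from rfl, show Int.toNat 7 = 7 from rfl]
      try omega

theorem pvA_mod (b : Int) :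
    slow_hamming_8_4_decode_py b = slow_hamming_8_4_decode_py (PySem.Int.mod b 256) := by
  unfold slow_hamming_8_4_decode_py
  rw [pvBitsA_mod]

theorem pvB_mod (b : Int) :
    slow_hamming_8_4_decode_py_alt b = slow_hamming_8_4_decode_py_alt (PySem.Int.mod b 256) := by
  unfold slow_hamming_8_4_decode_py_alt
  simp only [PySem.Int.mod_eq_emod_of_pos (show (0:Int) < 256 by norm_num)]
  rw [Int.emod_emod_of_dvd _ (dvd_refl 256)]

set_option maxHeartbeats 4000000 in
set_option maxRecDepth 40000 in
theorem pvKey : ∀ n : Fin 256,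
    if ((n.val : Int) ∈ pvDList) then
      slow_hamming_8_4_decode_py (n.val : Int) ≠ slow_hamming_8_4_decode_py_alt (n.val : Int)
    else
      slow_hamming_8_4_decode_py (n.val : Int) = slow_hamming_8_4_decode_py_alt (n.val : Int) := by
  decide

-- ===== VERDICT (by name: the statement is the Claim_ definition above) =====
theorem slow_hamming_8_4_decode_py_spec : Claim_unchanged_slow_hamming_8_4_decode_py := by
  intro b _ hD
  unfold D_slow_hamming_8_4_decode_py at hD
  have h0 : (0:Int) ≤ PySem.Int.mod b 256 := PySem.Int.mod_nonneg _ (by norm_num)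
  have h1 : PySem.Int.mod b 256 < 256 := PySem.Int.mod_lt _ (by norm_num)
  have hc : (((PySem.Int.mod b 256).toNat : Nat) : Int) = PySem.Int.mod b 256 :=
    Int.toNat_of_nonneg h0
  have hk := pvKey ⟨(PySem.Int.mod b 256).toNat, by omega⟩
  simp only [hc] at hk
  rw [if_neg hD] at hk
  rw [pvA_mod, pvB_mod]
  exact hk

set_option maxRecDepth 40000 in
theorem slow_hamming_8_4_decode_py_changed : Claim_changed_slow_hamming_8_4_decode_py := by
  unfold Claim_changed_slow_hamming_8_4_decode_py; decide

theorem slow_hamming_8_4_decode_py_tight : Claim_exact_slow_hamming_8_4_decode_py := by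
  intro b _ hD
  unfold D_slow_hamming_8_4_decode_py at hD
  have h0 : (0:Int) ≤ PySem.Int.mod b 256 := PySem.Int.mod_nonneg _ (by norm_num)
  have h1 : PySem.Int.mod b 256 < 256 := PySem.Int.mod_lt _ (by norm_num)
  have hc : (((PySem.Int.mod b 256).toNat : Nat) : Int) = PySem.Int.mod b 256 :=
    Int.toNat_of_nonneg h0
  have hk := pvKey ⟨(PySem.Int.mod b 256).toNat, by omega⟩
  simp only [hc] at hk
  rw [if_pos hD] at hk
  rw [pvA_mod, pvB_mod]
  exact hk
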